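-- pv_equiv track=rewrite | github.com/ulf1/treesimi | treesimi/convert.py | adjac_to_nested_recur
-- ===== SOURCE A (Python) =====
-- from typing import List, Tuple, Optional, Union
--
-- def adjac_to_nested_recur(adjac: List[Tuple[int, int]],
--                           nested: List[Tuple[int, int, int, int]],
--                           parent_id: Optional[int] = 0,
--                           lft: Optional[int] = 1,
--                           depth: Optional[int] = 0
--                           ) -> (int, List[Tuple[int, int, int, int]]):
--     """Recursive function to traverse over an adjacency list model based
--         tree to build the nested set model based tree
--
--     Don't use this function directly. Please call `treesimi.adjac_to_nested`
--
--     Parameters: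
--     -----------
--     adjac : List[Tuple[int, int]]
--         Adjacency list of the tree. The columns contain the following
--           information:
--             0: Node ID
--             1: Parent ID of the node
--
--     parent_id : int
--         The current parent ID of the adjacency list
--
--     lft : int
--         The previous lft value of the nested set
--
--     depth : int
--         The current tree depth
--
--     nested: List[Tuple[int, int, int, int]]
--         see below
--
--     Returns:
--     --------
--     rgt + 1 : int
--         The next node's left value
--
--     nested : List[Tuple[int, int, int, int]]
--         Nested set table of the tree. The columns contain the following
--           information:
--             0: Node ID
--             1: Left value (root is 1)
--             2: Right value
--             3: Depth level (root is 0)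
--
--     Example:
--     --------
--         from treesimi.convert import adjac_to_nested_recur
--         adjac = [(1, 0), (2, 1), (3, 1), (4, 2)]
--         _, nested = adjac_to_nested_recur(
--             adjac, nested=[], parent_id=1, lft=1, depth=0)
--     """
--     # The next "rgt" value is at least "lft+1"
--     rgt = lft + 1
--     # Lookup all direct children nodes of the current parent node
--     #   from the adjacency list
--     children = [nid for nid, pid in adjac if pid == parent_id]
--     # Drill down till we reached each tree leaf
--     for child in children:
--         rgt, _ = adjac_to_nested_recur(adjac, nested, child, rgt, depth + 1)
--     nested.append([parent_id, lft, rgt, depth])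
--     return rgt + 1, nested
-- ===== SOURCE B (Python) =====
-- from typing import List, Tuple, Optional
--
-- def adjac_to_nested_recur(adjac: List[Tuple[int, int]],
--                           nested: List[Tuple[int, int, int, int]],
--                           parent_id: Optional[int] = 0,
--                           lft: Optional[int] = 1,
--                           depth: Optional[int] = 0
--                           ) -> (int, List[Tuple[int, int, int, int]]):
--     """Iterative DFS with an explicit stack instead of recursion.
--
--     Stack frames are ("enter", node, depth, budget) and
--     ("exit", node, lft, depth).  A running counter hands out left values
--     on entry and right values on exit; rows are appended to `nested` in
--     post-order, exactly as the recursive version does (same in-place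
--     mutation of `nested`).  `budget` is the remaining allowed depth: a
--     simple path in the tree has at most len(adjac) edges, so exhausting
--     the budget means the adjacency list is cyclic (where the recursive
--     version would blow the recursion limit) and we raise RecursionError.
--     """
--     counter = lft
--     stack = [("enter", parent_id, depth, len(adjac) + 1)]
--     while stack:
--         frame = stack.pop()
--         if frame[0] == "enter":
--             _, node, d, budget = frame
--             if budget == 0:
--                 raise RecursionError("cycle in adjacency list")
--             stack.append(("exit", node, counter, d))
--             counter += 1
--             # push children reversed so the first child is on top
--             for nid, pid in reversed(adjac):
--                 if pid == node:
--                     stack.append(("enter", nid, d + 1, budget - 1))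
--         else:
--             _, node, node_lft, d = frame
--             nested.append([node, node_lft, counter, d])
--             counter += 1
--     return counter, nested
-- ===== Notes on version B (the rewrite author's own statement) =====
-- stated objective: alternative
-- what changed: Replaced the recursive tree traversal by an iterative DFS over an explicit stack of enter/exit frames with a single running counter handing out left values on entry and right values on exit, appending rows in the same post-order and mutating the same nested list.
import Mathlib
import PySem

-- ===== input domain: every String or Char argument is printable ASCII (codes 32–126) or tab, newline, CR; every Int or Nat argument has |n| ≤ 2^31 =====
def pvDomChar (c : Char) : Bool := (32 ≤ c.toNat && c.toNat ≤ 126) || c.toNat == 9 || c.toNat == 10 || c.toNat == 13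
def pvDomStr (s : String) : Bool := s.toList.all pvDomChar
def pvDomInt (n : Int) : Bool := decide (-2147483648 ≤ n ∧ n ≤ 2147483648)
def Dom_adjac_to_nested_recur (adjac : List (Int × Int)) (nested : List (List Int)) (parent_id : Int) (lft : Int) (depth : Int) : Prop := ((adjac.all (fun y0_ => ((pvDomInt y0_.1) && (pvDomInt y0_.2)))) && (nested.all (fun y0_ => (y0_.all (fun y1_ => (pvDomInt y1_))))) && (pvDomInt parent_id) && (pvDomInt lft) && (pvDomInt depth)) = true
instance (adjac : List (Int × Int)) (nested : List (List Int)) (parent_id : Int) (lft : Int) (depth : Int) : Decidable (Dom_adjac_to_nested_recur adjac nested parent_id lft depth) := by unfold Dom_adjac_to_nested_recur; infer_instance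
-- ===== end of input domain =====

-- B replaces A's recursion by an iterative DFS over an explicit stack with a running counter
-- (objective: alternative decomposition, same cost); B performs the same in-place append
-- mutation of `nested` as A.

-- ===== PORT A =====
-- Fueled transliteration of A's recursion; the fuel (recursion depth bound adjac.length + 1)
-- is only a totality guard: it is never exhausted on inputs satisfying Pre_.
def pvRecA (adjac : List (Int × Int)) : Nat → List (List Int) → Int → Int → Int → Int × List (List Int)
  | 0, nested, _, lft, _ => (lft + 1, nested)
  | fuel + 1, nested, parent_id, lft, depth =>
      -- children = [nid for nid, pid in adjac if pid == parent_id]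
      let children := (adjac.filter (fun e => e.2 == parent_id)).map Prod.fst
      -- for child in children: rgt, _ = recur(adjac, nested, child, rgt, depth + 1)
      let st := children.foldl (fun st c => pvRecA adjac fuel st.2 c st.1 (depth + 1)) (lft + 1, nested)
      (st.1 + 1, st.2 ++ [[parent_id, lft, st.1, depth]])

def adjac_to_nested_recur (adjac : List (Int × Int)) (nested : List (List Int)) (parent_id : Int) (lft : Int) (depth : Int) : Int × List (List Int) :=
  pvRecA adjac (adjac.length + 1) nested parent_id lft depth

-- ===== PORT B =====
-- Stack frames: ("enter", node, depth, budget) and ("exit", node, lft, depth); list head = stack top.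
inductive PvFrame
  | enter (node : Int) (depth : Int) (budget : Nat)
  | exit (node : Int) (lft : Int) (depth : Int)
deriving DecidableEq, Repr

-- Fueled transliteration of B's while loop; the fuel is only a totality guard: under Pre_
-- the loop performs at most 2 * (number of node visits) ≤ the given fuel iterations.
def pvLoopB (adjac : List (Int × Int)) : Nat → List PvFrame → Int → List (List Int) → Int × List (List Int)
  | _, [], counter, nested => (counter, nested)
  | 0, _ :: _, counter, nested => (counter, nested)
  | fuel + 1, PvFrame.enter node d budget :: rest, counter, nested =>
      match budget with
      -- budget exhausted: raise RecursionError("cycle in adjacency list") — only on cyclic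
      -- inputs, which lie outside Pre_ (the raise is modelled by stopping with (counter, nested))
      | 0 => (counter, nested)
      -- push the exit frame, then the children found scanning reversed(adjac)
      | b + 1 =>
          pvLoopB adjac fuel
            ((adjac.reverse.filter (fun e => e.2 == node)).foldl
              (fun st e => PvFrame.enter e.1 (d + 1) b :: st)
              (PvFrame.exit node counter d :: rest))
            (counter + 1) nested
  | fuel + 1, PvFrame.exit node node_lft d :: rest, counter, nested =>
      pvLoopB adjac fuel rest (counter + 1) (nested ++ [[node, node_lft, counter, d]])

def adjac_to_nested_recur_alt (adjac : List (Int × Int)) (nested : List (List Int)) (parent_id : Int) (lft : Int) (depth : Int) : Int × List (List Int) :=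
  pvLoopB adjac (2 * (adjac.length + 1) ^ (adjac.length + 1)) [PvFrame.enter parent_id depth (adjac.length + 1)] lft nested

-- ===== PRECONDITION & SPEC =====
-- pvOk adjac f p: every descending chain of the child relation starting at p has length < f.
def pvOk (adjac : List (Int × Int)) : Nat → Int → Bool
  | 0, _ => false
  | f + 1, p => ((adjac.filter (fun e => e.2 == p)).map Prod.fst).all (pvOk adjac f)

-- Pre_: the part of the child relation reachable from parent_id is acyclic (no chain longer
-- than |adjac|, which is the pigeonhole bound); these are exactly the inputs on which Python A's
-- recursion terminates — on cyclic inputs A raises RecursionError (and B's while loop diverges).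
def Pre_adjac_to_nested_recur (adjac : List (Int × Int)) (nested : List (List Int)) (parent_id : Int) (lft : Int) (depth : Int) : Prop :=
  pvOk adjac (adjac.length + 1) parent_id = true

instance (adjac : List (Int × Int)) (nested : List (List Int)) (parent_id : Int) (lft : Int) (depth : Int) : Decidable (Pre_adjac_to_nested_recur adjac nested parent_id lft depth) := by
  unfold Pre_adjac_to_nested_recur; infer_instance

def pvWitness_adjac_to_nested_recur : (List (Int × Int)) × List (List Int) × Int × Int × Int :=
  ([(1, 0), (2, 1), (3, 1)], [], 0, 1, 0)

def Spec_adjac_to_nested_recur (adjac : List (Int × Int)) (nested : List (List Int)) (parent_id : Int) (lft : Int) (depth : Int) (out : Int × List (List Int)) : Prop := out = adjac_to_nested_recur_alt adjac nested parent_id lft depth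
instance (adjac : List (Int × Int)) (nested : List (List Int)) (parent_id : Int) (lft : Int) (depth : Int) (out : Int × List (List Int)) : Decidable (Spec_adjac_to_nested_recur adjac nested parent_id lft depth out) := by unfold Spec_adjac_to_nested_recur; infer_instance

-- ===== CLAIM (what is proved, stated in full; the proofs are below) =====
def Claim_equal_adjac_to_nested_recur : Prop := ∀ (adjac : List (Int × Int)) (nested : List (List Int)) (parent_id : Int) (lft : Int) (depth : Int), Dom_adjac_to_nested_recur adjac nested parent_id lft depth → Pre_adjac_to_nested_recur adjac nested parent_id lft depth → Spec_adjac_to_nested_recur adjac nested parent_id lft depth (adjac_to_nested_recur adjac nested parent_id lft depth)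

-- ===== LEMMAS AND PROOFS =====

-- number of node visits of the traversal, fueled like pvRecA
def pvVisits (adjac : List (Int × Int)) : Nat → Int → Nat
  | 0, _ => 0
  | f + 1, p => 1 + (((adjac.filter (fun e => e.2 == p)).map Prod.fst).map (pvVisits adjac f)).sum

lemma pvFoldl_cons_rev {α β : Type} (g : α → β) :
    ∀ (l : List α) (init : List β),
      l.foldl (fun st e => g e :: st) init = (l.map g).reverse ++ init := by
  intro l
  induction l with
  | nil => intro init; rfl
  | cons a l ih =>
      intro init
      simp [List.foldl_cons, ih (g a :: init)]

-- the enter step of pvLoopB, with the pushed children normalised to a map in original order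
lemma pvLoopB_enter (adjac : List (Int × Int)) (fuel : Nat) (node d counter : Int) (b : Nat)
    (rest : List PvFrame) (nested : List (List Int)) :
    pvLoopB adjac (fuel + 1) (PvFrame.enter node d (b + 1) :: rest) counter nested
      = pvLoopB adjac fuel
          (((adjac.filter (fun e => e.2 == node)).map Prod.fst).map (fun c => PvFrame.enter c (d + 1) b)
            ++ PvFrame.exit node counter d :: rest)
          (counter + 1) nested := by
  show pvLoopB adjac fuel _ _ _ = _
  rw [pvFoldl_cons_rev]
  simp [List.filter_reverse, List.map_map, Function.comp_def]

lemma pvLoopB_nil (adjac : List (Int × Int)) (fuel : Nat) (counter : Int) (nested : List (List Int)) :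
    pvLoopB adjac fuel [] counter nested = (counter, nested) := by
  cases fuel <;> rfl

-- the child loop: processing a block of enter frames equals A's foldl over the children
lemma pvSimKids (adjac : List (Int × Int)) (f : Nat)
    (IH : ∀ p, pvOk adjac f p = true →
      ∀ (d : Int) (stack : List PvFrame) (lft : Int) (nested : List (List Int)) (fb : Nat),
        pvLoopB adjac (2 * pvVisits adjac f p + fb) (PvFrame.enter p d f :: stack) lft nested
          = pvLoopB adjac fb stack (pvRecA adjac f nested p lft d).1 (pvRecA adjac f nested p lft d).2) :
    ∀ (cs : List Int), (∀ c ∈ cs, pvOk adjac f c = true) →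
      ∀ (d : Int) (stack : List PvFrame) (rgt : Int) (nested : List (List Int)) (fb : Nat),
        pvLoopB adjac (2 * (cs.map (pvVisits adjac f)).sum + fb)
            (cs.map (fun c => PvFrame.enter c (d + 1) f) ++ stack) rgt nested
          = pvLoopB adjac fb stack
              (cs.foldl (fun st c => pvRecA adjac f st.2 c st.1 (d + 1)) (rgt, nested)).1
              (cs.foldl (fun st c => pvRecA adjac f st.2 c st.1 (d + 1)) (rgt, nested)).2 := by
  intro cs
  induction cs with
  | nil => intro _ d stack rgt nested fb; simp
  | cons c cs ih =>
      intro hcs d stack rgt nested fb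
      have hc : pvOk adjac f c = true := hcs c (by simp)
      have hrest : ∀ x ∈ cs, pvOk adjac f x = true := fun x hx => hcs x (by simp [hx])
      have harith : 2 * ((c :: cs).map (pvVisits adjac f)).sum + fb
          = 2 * pvVisits adjac f c + (2 * (cs.map (pvVisits adjac f)).sum + fb) := by
        simp [List.map_cons, List.sum_cons]; ring
      rw [harith]
      simp only [List.map_cons, List.cons_append]
      rw [IH c hc (d := d + 1) (stack := cs.map (fun c => PvFrame.enter c (d + 1) f) ++ stack)]
      rw [ih hrest]
      simp [List.foldl_cons]
  
-- main simulation: one enter frame runs A's whole recursion for that node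
lemma pvSim (adjac : List (Int × Int)) :
    ∀ (f : Nat) (p : Int), pvOk adjac f p = true →
      ∀ (d : Int) (stack : List PvFrame) (lft : Int) (nested : List (List Int)) (fb : Nat),
        pvLoopB adjac (2 * pvVisits adjac f p + fb) (PvFrame.enter p d f :: stack) lft nested
          = pvLoopB adjac fb stack (pvRecA adjac f nested p lft d).1 (pvRecA adjac f nested p lft d).2 := by
  intro f
  induction f with
  | zero => intro p hp; simp [pvOk] at hp
  | succ f ihf =>
      intro p hp d stack lft nested fb
      have hkids : ∀ c ∈ (adjac.filter (fun e => e.2 == p)).map Prod.fst, pvOk adjac f c = true := by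
        intro c hc
        have := (List.all_eq_true.mp (by simpa [pvOk] using hp)) c hc
        simpa using this
      have harith : 2 * pvVisits adjac (f + 1) p + fb
          = (2 * (((adjac.filter (fun e => e.2 == p)).map Prod.fst).map (pvVisits adjac f)).sum
              + (1 + fb)) + 1 := by
        simp [pvVisits]; ring
      rw [harith, pvLoopB_enter]
      rw [pvSimKids adjac f ihf _ hkids]
      show pvLoopB adjac (1 + fb) _ _ _ = _
      have h1fb : 1 + fb = fb + 1 := by omega
      rw [h1fb]
      show pvLoopB adjac fb stack _ _ = _
      simp [pvRecA]

lemma pvVisits_le (adjac : List (Int × Int)) :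
    ∀ (f : Nat) (p : Int), pvVisits adjac f p ≤ (adjac.length + 1) ^ f := by
  intro f
  induction f with
  | zero => intro p; simp [pvVisits]
  | succ f ihf =>
      intro p
      have hsum : (((adjac.filter (fun e => e.2 == p)).map Prod.fst).map (pvVisits adjac f)).sum
          ≤ ((adjac.filter (fun e => e.2 == p)).map Prod.fst).length * (adjac.length + 1) ^ f := by
        have := List.sum_le_card_nsmul
            (((adjac.filter (fun e => e.2 == p)).map Prod.fst).map (pvVisits adjac f))
            ((adjac.length + 1) ^ f)
            (by intro x hx; rcases List.mem_map.mp hx with ⟨c, _, rfl⟩; exact ihf c)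
        simpa [smul_eq_mul] using this
      have hlen : ((adjac.filter (fun e => e.2 == p)).map Prod.fst).length ≤ adjac.length := by
        simpa using List.length_filter_le _ adjac
      have hsum' : (((adjac.filter (fun e => e.2 == p)).map Prod.fst).map (pvVisits adjac f)).sum
          ≤ adjac.length * (adjac.length + 1) ^ f :=
        le_trans hsum (Nat.mul_le_mul_right _ hlen)
      have hpow : 1 ≤ (adjac.length + 1) ^ f := Nat.one_le_pow _ _ (by omega)
      have hexp : (adjac.length + 1) ^ (f + 1)
          = (adjac.length + 1) ^ f + adjac.length * (adjac.length + 1) ^ f := by ring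
      simp only [pvVisits]
      omega

-- ===== VERDICT (by name: the statement is the Claim_ definition above) =====
theorem adjac_to_nested_recur_spec : Claim_equal_adjac_to_nested_recur := by
  intro adjac nested parent_id lft depth _hDom hPre
  unfold Spec_adjac_to_nested_recur adjac_to_nested_recur adjac_to_nested_recur_alt
  have hv : 2 * pvVisits adjac (adjac.length + 1) parent_id
      ≤ 2 * (adjac.length + 1) ^ (adjac.length + 1) :=
    Nat.mul_le_mul_left _ (pvVisits_le adjac _ parent_id)
  have hfuel : 2 * (adjac.length + 1) ^ (adjac.length + 1)
      = 2 * pvVisits adjac (adjac.length + 1) parent_id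
        + (2 * (adjac.length + 1) ^ (adjac.length + 1)
            - 2 * pvVisits adjac (adjac.length + 1) parent_id) := by omega
  rw [hfuel, pvSim adjac (adjac.length + 1) parent_id hPre, pvLoopB_nil]
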